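-- pv_equiv track=rewrite | github.com/dtrodrigues/uv-sudoku | validate.py | is_valid_group
-- ===== SOURCE A (Python) =====
-- def is_valid_group(group):
--     seen = set()
--     for num in group:
--         if num != 0:
--             if num in seen or not (1 <= num <= 9):
--                 return False
--             seen.add(num)
--     return True
-- ===== SOURCE B (Python) =====
-- def is_valid_group(group):
--     nums = sorted(n for n in group if n != 0)
--     if not nums:
--         return True
--     if nums[0] < 1 or nums[-1] > 9:
--         return False
--     return all(a < b for a, b in zip(nums, nums[1:]))
-- ===== Notes on version B (the rewrite author's own statement) =====
-- stated objective: alternative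
-- what changed: Replaces A's single early-return scan with a growing seen-set by sort-then-scan: sort the nonzero entries, bound-check only the first and last element, and detect duplicates by comparing adjacent sorted neighbours for strict increase.
import Mathlib
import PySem

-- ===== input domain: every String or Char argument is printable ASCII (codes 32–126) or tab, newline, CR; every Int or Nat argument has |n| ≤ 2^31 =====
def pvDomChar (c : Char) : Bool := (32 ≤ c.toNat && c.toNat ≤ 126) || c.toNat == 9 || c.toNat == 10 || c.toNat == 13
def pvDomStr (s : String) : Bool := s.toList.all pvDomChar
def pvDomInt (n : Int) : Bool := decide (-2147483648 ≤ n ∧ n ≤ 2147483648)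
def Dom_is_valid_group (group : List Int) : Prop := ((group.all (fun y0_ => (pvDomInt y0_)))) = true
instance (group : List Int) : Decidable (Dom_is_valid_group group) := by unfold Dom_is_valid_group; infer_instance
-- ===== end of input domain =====

-- B replaces A's seen-set scan by sort-then-scan (bound-check the sorted ends, adjacent strict increase); no speed claim.

-- ===== PORT A =====
-- the for-loop of A, with its early return and the growing 'seen' set
def isValidLoopA (seen : PySem.Set Int) : List Int → Bool
  | [] => true
  | num :: rest =>
    if num ≠ 0 then
      if PySem.Set.contains seen num || !(decide (1 ≤ num) && decide (num ≤ 9)) then false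
      else isValidLoopA (PySem.Set.add seen num) rest
    else isValidLoopA seen rest

def is_valid_group (group : List Int) : Bool := isValidLoopA PySem.Set.empty group

-- ===== PORT B =====
def is_valid_group_alt (group : List Int) : Bool :=
  let nums := PySem.List.sorted (group.filter (fun n => decide (n ≠ 0))) (fun x => x) false
  if nums = [] then true
  -- nums[0] < 1 or nums[-1] > 9 (nums nonempty here, so headI/getLastD are exact)
  else if decide (nums.headI < 1) || decide (nums.getLastD 0 > 9) then false
  -- all(a < b for a, b in zip(nums, nums[1:]))
  else (nums.zip nums.tail).all (fun p => decide (p.1 < p.2))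

-- ===== PRECONDITION & SPEC =====
def Spec_is_valid_group (group : List Int) (out : Bool) : Prop := out = is_valid_group_alt group
instance (group : List Int) (out : Bool) : Decidable (Spec_is_valid_group group out) := by unfold Spec_is_valid_group; infer_instance

-- ===== CLAIM (what is proved, stated in full; the proofs are below) =====
def Claim_equal_is_valid_group : Prop := ∀ (group : List Int), Dom_is_valid_group group → Spec_is_valid_group group (is_valid_group group)

-- ===== LEMMAS AND PROOFS =====

-- A's loop returns true iff the yet-unseen nonzero entries are in range, pairwise distinct and disjoint from 'seen'
theorem isValidLoopA_eq_true_iff (l : List Int) : ∀ (seen : PySem.Set Int),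
    (isValidLoopA seen l = true ↔
      ((∀ n ∈ l.filter (fun n => decide (n ≠ 0)), (1 ≤ n ∧ n ≤ 9) ∧ n ∉ seen) ∧
        (l.filter (fun n => decide (n ≠ 0))).Nodup)) := by
  induction l with
  | nil => intro seen; simp [isValidLoopA]
  | cons num rest ih =>
    intro seen
    by_cases h0 : num = 0
    · simp [isValidLoopA, h0, ih]
    · simp only [isValidLoopA, if_pos h0]
      cases hbad : PySem.Set.contains seen num || !(decide (1 ≤ num) && decide (num ≤ 9)) with
      | true =>
        rw [if_pos rfl]
        simp only [Bool.or_eq_true, PySem.Set.contains_iff, Bool.not_eq_eq_eq_not, Bool.not_true,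
          Bool.and_eq_false_iff, decide_eq_false_iff_not, not_le] at hbad
        simp only [List.filter_cons, decide_eq_true_eq]
        rw [if_pos (by simpa using h0)]
        constructor
        · intro h; cases h
        · rintro ⟨hall, _⟩
          have := hall num (by simp)
          rcases hbad with hmem | h1 | h9
          · exact absurd hmem this.2
          · omega
          · omega
      | false =>
        rw [if_neg (by simp)]
        simp only [Bool.or_eq_false_iff, Bool.not_eq_false', Bool.and_eq_true,
          decide_eq_true_eq] at hbad
        obtain ⟨hcf, h1, h9⟩ := hbad
        have hns : num ∉ seen := by simpa using hcf
        rw [ih (PySem.Set.add seen num)]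
        simp only [List.filter_cons, decide_eq_true_eq]
        rw [if_pos (by simpa using h0)]
        simp only [List.nodup_cons, List.mem_cons, PySem.Set.mem_add]
        constructor
        · rintro ⟨hall, hnd⟩
          refine ⟨?_, ?_, hnd⟩
          · rintro n (rfl | hn)
            · exact ⟨⟨h1, h9⟩, hns⟩
            · have := hall n hn
              exact ⟨this.1, fun hm => this.2 (Or.inl hm)⟩
          · intro hm; exact (hall num hm).2 (Or.inr rfl)
        · rintro ⟨hall, hnotmem, hnd⟩
          refine ⟨?_, hnd⟩
          intro n hn
          have := hall n (Or.inr hn)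
          refine ⟨this.1, ?_⟩
          rintro (hm | rfl)
          · exact this.2 hm
          · exact hnotmem hn

-- the zip-adjacent pass of B: all adjacent pairs strictly increase iff the list is pairwise <
theorem zip_tail_all_iff_pairwise (xs : List Int) :
    ((xs.zip xs.tail).all (fun p => decide (p.1 < p.2)) = true ↔ xs.Pairwise (· < ·)) := by
  induction xs with
  | nil => simp
  | cons x xs ih =>
    cases xs with
    | nil => simp
    | cons y ys =>
      simp only [List.tail_cons, List.zip_cons_cons, List.all_cons, Bool.and_eq_true,
        decide_eq_true_eq] at ih ⊢
      rw [ih]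
      constructor
      · rintro ⟨hxy, hp⟩
        refine List.Pairwise.cons ?_ hp
        intro z hz
        rcases List.mem_cons.1 hz with rfl | hz
        · exact hxy
        · exact lt_trans hxy (List.rel_of_pairwise_cons hp hz)
      · intro h
        exact ⟨List.rel_of_pairwise_cons h (by simp), h.of_cons⟩

-- getLastD of a nonempty list is its getLast
theorem getLastD_eq_getLast_of_ne_nil (l : List Int) (h : l ≠ []) :
    l.getLastD 0 = l.getLast h := by
  cases l with
  | nil => exact absurd rfl h
  | cons a t => simp [List.getLastD_eq_getLast?, List.getLast?_eq_some_getLast h]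

-- every element of sorted(f) is ≤ its last element
theorem sorted_le_getLastD (f : List Int) (y : Int)
    (hy : y ∈ PySem.List.sorted f (fun x => x) false) :
    y ≤ (PySem.List.sorted f (fun x => x) false).getLastD 0 := by
  obtain ⟨p, hp, hyp⟩ := List.getElem_of_mem hy
  have hne : PySem.List.sorted f (fun x => x) false ≠ [] := by
    intro h; rw [h] at hy; simp at hy
  have hlen : (PySem.List.sorted f (fun x => x) false).length - 1 <
      (PySem.List.sorted f (fun x => x) false).length := by omega
  have hmono := PySem.List.sorted_id_getElem_mono f (p := p)
    (q := (PySem.List.sorted f (fun x => x) false).length - 1) (by omega) hlen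
  rw [getLastD_eq_getLast_of_ne_nil _ hne, List.getLast_eq_getElem, ← hyp]
  exact hmono

-- ===== VERDICT (by name: the statement is the Claim_ definition above) =====
theorem is_valid_group_spec : Claim_equal_is_valid_group := by
  intro group _
  unfold Spec_is_valid_group is_valid_group is_valid_group_alt
  set f := group.filter (fun n => decide (n ≠ 0)) with hf
  set s := PySem.List.sorted f (fun x => x) false with hs
  have hperm : s.Perm f := PySem.List.sorted_perm f _ _
  have hpw : s.Pairwise (fun a b => a ≤ b) := by
    simpa using PySem.List.sorted_pairwise f (fun x => x)
  rw [Bool.eq_iff_iff, isValidLoopA_eq_true_iff]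
  simp only [PySem.Set.empty, List.not_mem_nil, not_false_iff, and_true]
  rw [← hf]
  by_cases hni : s = []
  · have hfnil : f = [] := (hni ▸ hperm).symm.eq_nil
    rw [if_pos hni]
    simp [hfnil]
  · rw [if_neg hni]
    obtain ⟨m, rest, hcs⟩ := List.exists_cons_of_ne_nil hni
    have hmemf : ∀ n, n ∈ f ↔ n ∈ s := fun n => (hperm.mem_iff).symm
    have hndf : f.Nodup ↔ s.Nodup := (hperm.nodup_iff).symm
    have hhead : ∀ y ∈ f, s.headI ≤ y := by
      intro y hy
      have := PySem.List.key_head_sorted_le f (fun x => x) (hs ▸ hcs) y hy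
      simpa [hcs] using this
    have hheadmem : s.headI ∈ s := by rw [hcs]; simp
    have hlastmem : s.getLastD 0 ∈ s := by
      rw [getLastD_eq_getLast_of_ne_nil _ hni]
      exact List.getLast_mem _
    have hlast : ∀ y ∈ s, y ≤ s.getLastD 0 := fun y hy => sorted_le_getLastD f y (hs ▸ hy)
    by_cases hcond : (decide (s.headI < 1) || decide (s.getLastD 0 > 9)) = true
    · rw [if_pos hcond]
      simp only [Bool.false_eq_true, iff_false, not_and]
      intro hall _
      simp only [Bool.or_eq_true, decide_eq_true_eq] at hcond
      have h1 := (hall _ ((hmemf _).2 hheadmem)).1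
      have h2 := (hall _ ((hmemf _).2 hlastmem)).2
      rcases hcond with h | h
      · omega
      · omega
    · rw [if_neg hcond, zip_tail_all_iff_pairwise]
      rw [Bool.not_eq_true] at hcond
      simp only [Bool.or_eq_false_iff, decide_eq_false_iff_not, not_lt] at hcond
      obtain ⟨hm1, hl9⟩ := hcond
      constructor
      · rintro ⟨hall, hnd⟩
        have hnds : s.Nodup := hndf.1 hnd
        have := hpw.and hnds
        exact this.imp (fun {a b} h => lt_of_le_of_ne h.1 h.2)
      · intro hb
        have hnds : s.Nodup := hb.imp (fun h => ne_of_lt h)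
        refine ⟨?_, hndf.2 hnds⟩
        intro n hn
        have hn' := (hmemf n).1 hn
        exact ⟨le_trans hm1 (hhead n hn), le_trans (hlast n hn') hl9⟩
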